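-- pv_equiv track=rewrite | github.com/jenny-df/Python-Workout-Exercises | Exercise 9.py | even_odd_sums
-- ===== SOURCE A (Python) =====
-- def even_odd_sums(nums):
-- 	even = 0
-- 	odd = 0
-- 	for i in range(len(nums)):
-- 		if i%2 == 0:
-- 			even+=nums[i]
-- 		else:
-- 			odd+=nums[i]
-- 	return [even,odd]
-- ===== SOURCE B (Python) =====
-- def even_odd_sums(nums):
--     return [sum(nums[0::2]), sum(nums[1::2])]
-- ===== Notes on version B (the rewrite author's own statement) =====
-- stated objective: idiomatic
-- what changed: Replaces the single indexed loop with a modulo branch by two strided slices (nums[0::2], nums[1::2]) each summed with the builtin sum; no explicit index or if/else remains.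
import Mathlib
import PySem

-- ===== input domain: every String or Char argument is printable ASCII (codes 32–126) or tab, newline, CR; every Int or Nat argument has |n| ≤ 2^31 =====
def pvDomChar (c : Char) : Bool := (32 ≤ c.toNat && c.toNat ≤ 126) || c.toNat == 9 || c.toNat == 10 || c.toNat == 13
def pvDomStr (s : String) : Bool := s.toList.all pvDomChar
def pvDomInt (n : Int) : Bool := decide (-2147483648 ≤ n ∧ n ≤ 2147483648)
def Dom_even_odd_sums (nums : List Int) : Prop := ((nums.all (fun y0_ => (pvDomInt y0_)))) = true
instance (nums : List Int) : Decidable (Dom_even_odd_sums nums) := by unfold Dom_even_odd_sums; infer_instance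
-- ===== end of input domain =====

-- B sums the two strided slices nums[0::2] / nums[1::2] instead of A's indexed loop with a modulo branch (objective: idiomatic; same O(n) cost).

-- ===== PORT A =====
-- one indexed pass: for i in range(len(nums)): branch on i % 2, accumulating (even, odd)
def even_odd_sums (nums : List Int) : List Int :=
  let p := (PySem.List.pyRange 0 (PySem.List.len nums) 1).foldl
    (fun (s : Int × Int) i =>
      if PySem.Int.mod i 2 == 0 then (s.1 + PySem.List.pyGetD nums i 0, s.2)
      else (s.1, s.2 + PySem.List.pyGetD nums i 0))
    (0, 0)
  [p.1, p.2]

-- ===== PORT B =====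
-- nums[a::2] : every second element starting at the head (the stride-2 slice)
def strideTwo (xs : List Int) : List Int :=
  match xs with
  | [] => []
  | [x] => [x]
  | x :: _ :: rest => x :: strideTwo rest

def even_odd_sums_alt (nums : List Int) : List Int :=
  [(strideTwo nums).sum, (strideTwo nums.tail).sum]

-- ===== PRECONDITION & SPEC =====
def Spec_even_odd_sums (nums : List Int) (out : List Int) : Prop := out = even_odd_sums_alt nums
instance (nums : List Int) (out : List Int) : Decidable (Spec_even_odd_sums nums out) := by unfold Spec_even_odd_sums; infer_instance

-- ===== CLAIM (what is proved, stated in full; the proofs are below) =====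
def Claim_equal_even_odd_sums : Prop := ∀ (nums : List Int), Dom_even_odd_sums nums → Spec_even_odd_sums nums (even_odd_sums nums)

-- ===== LEMMAS AND PROOFS =====

theorem strideTwo_cons (x : Int) (xs : List Int) :
    strideTwo (x :: xs) = x :: strideTwo xs.tail := by
  cases xs <;> simp [strideTwo]

theorem key (xs : List Int) (s : Int) (e o : Int) (hs : 0 ≤ s) :
    (PySem.List.enumerate xs s).foldl
      (fun (p : Int × Int) (q : Int × Int) =>
        if PySem.Int.mod q.1 2 == 0 then (p.1 + q.2, p.2) else (p.1, p.2 + q.2))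
      (e, o)
    = if PySem.Int.mod s 2 == 0
      then (e + (strideTwo xs).sum, o + (strideTwo xs.tail).sum)
      else (e + (strideTwo xs.tail).sum, o + (strideTwo xs).sum) := by
  induction xs generalizing s e o with
  | nil => simp [PySem.List.enumerate, strideTwo]
  | cons x t ih =>
    have hmod : PySem.Int.mod s 2 = s % 2 := by
      simp [PySem.Int.mod, Int.fmod_eq_emod]
    have hmod1 : PySem.Int.mod (s + 1) 2 = (s + 1) % 2 := by
      simp [PySem.Int.mod, Int.fmod_eq_emod]
    rw [show PySem.List.enumerate (x :: t) s = (s, x) :: PySem.List.enumerate t (s + 1) from rfl]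
    simp only [List.foldl_cons]
    by_cases h : s % 2 = 0
    · have h1 : (s + 1) % 2 = 1 := by omega
      rw [ih (s + 1) _ _ (by omega)]
      simp only [hmod, hmod1, h, h1, strideTwo_cons, List.tail_cons, List.sum_cons]
      norm_num
      ring
    · have h0 : s % 2 = 1 := by omega
      have h1 : (s + 1) % 2 = 0 := by omega
      rw [ih (s + 1) _ _ (by omega)]
      simp only [hmod, hmod1, h0, h1, strideTwo_cons, List.tail_cons, List.sum_cons]
      norm_num
      ring

-- ===== VERDICT (by name: the statement is the Claim_ definition above) =====
theorem even_odd_sums_spec : Claim_equal_even_odd_sums := by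
  intro nums _
  show even_odd_sums nums = even_odd_sums_alt nums
  unfold even_odd_sums even_odd_sums_alt
  have he : PySem.List.enumerate nums 0
      = (PySem.List.pyRange 0 (PySem.List.len nums) 1).map
          (fun j => (j, PySem.List.pyGetD nums j 0)) := by
    simpa using (PySem.List.enumerate_eq_map_pyRange (xs := nums) (d := 0))
  have := key nums 0 0 0 (by omega)
  rw [he, List.foldl_map] at this
  simp only [PySem.List.len_eq] at this ⊢
  rw [this]
  norm_num [PySem.Int.mod]
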